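-- pv_equiv track=rewrite | github.com/our-study/able_coding_master | YoungJin/초급/무향그래프.py | build_accumulation_tree
-- ===== SOURCE A (Python) =====
-- import math
--
-- def build_accumulation_tree(arr):
--     # 배열의 길이를 2의 거듭제곱으로 맞추기 위해 필요한 0의 개수를 구한다
--     n = len(arr)
--     power_of_two = 2 ** math.ceil(math.log2(n))
--     arr += [0] * (power_of_two - n)  # 부족한 부분을 0으로 채움
--
--     tree = [arr]  # 트리의 바닥 레벨(리프 노드)
--
--     # 상위 레벨을 계속 만들어 나감
--     while len(tree[0]) > 1:
--         current_level = tree[0]  # 현재 레벨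
--         next_level = []  # 다음 레벨(상위 레벨)
--
--         # 하위 두 노드의 합으로 상위 노드를 만듦
--         for i in range(0, len(current_level), 2):
--             next_level.append(current_level[i] + current_level[i + 1])
--
--         tree.insert(0, next_level)  # 상위 레벨을 트리의 앞에 삽입
--
--     return tree
-- ===== SOURCE B (Python) =====
-- import math
--
-- def _build(sub):
--     # divide-and-conquer: return the full level list (root level first) for sub
--     if len(sub) == 1:
--         return [[sub[0]]]
--     mid = len(sub) // 2
--     left = _build(sub[:mid])
--     right = _build(sub[mid:])
--     return [[left[0][0] + right[0][0]]] + [left[k] + right[k] for k in range(len(left))]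
--
-- def build_accumulation_tree(arr):
--     n = len(arr)
--     power_of_two = 2 ** math.ceil(math.log2(n))
--     arr += [0] * (power_of_two - n)  # same in-place padding as the original
--     return _build(arr)
-- ===== Notes on version B (the rewrite author's own statement) =====
-- stated objective: alternative
-- what changed: Replaces A's bottom-up while loop that repeatedly folds the top level pairwise and prepends it with a divide-and-conquer recursion that builds each half's level list and zips the halves together (same in-place zero padding kept).
import Mathlib
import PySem

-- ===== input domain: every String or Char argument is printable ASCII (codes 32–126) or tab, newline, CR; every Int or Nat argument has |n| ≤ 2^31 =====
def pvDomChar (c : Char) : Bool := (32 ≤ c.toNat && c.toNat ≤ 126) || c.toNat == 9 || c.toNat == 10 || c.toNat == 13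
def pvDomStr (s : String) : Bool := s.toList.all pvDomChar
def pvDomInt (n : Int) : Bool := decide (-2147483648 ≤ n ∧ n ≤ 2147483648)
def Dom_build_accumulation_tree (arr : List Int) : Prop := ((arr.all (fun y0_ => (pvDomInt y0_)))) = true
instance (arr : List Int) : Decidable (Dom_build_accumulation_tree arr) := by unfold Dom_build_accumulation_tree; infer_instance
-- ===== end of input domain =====

-- B rebuilds the same levels by divide-and-conquer recursion on the tree structure instead of
-- A's bottom-up level-by-level while loop; return values are proved equal on nonempty input.
-- Both Pythons mutate `arr` in place identically (the power-of-two zero padding); equivalence here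
-- is about the return value.

-- ===== PORT A =====
-- for i in range(0, len, 2): next.append(cur[i] + cur[i+1]); an odd-length level is unreachable
-- (every level has power-of-two length), where Python would raise IndexError.
def pairSum : List Int → List Int
  | a :: b :: rest => (a + b) :: pairSum rest
  | _ => []

-- needed by the termination proofs of buildUp/levelsF
theorem pairSum_length : ∀ l : List Int, (pairSum l).length = l.length / 2
  | [] => by simp [pairSum]
  | [_] => by simp [pairSum]
  | _ :: _ :: t => by simp [pairSum, pairSum_length t]; omega

-- the while loop: tree = current :: …, prepend the pairwise-sum level while the top has length > 1
def buildUp (current : List Int) (tree : List (List Int)) : List (List Int) :=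
  if current.length > 1 then
    let next := pairSum current
    buildUp next (next :: tree)
  else tree
termination_by current.length
decreasing_by simp [pairSum_length]; omega

def build_accumulation_tree (arr : List Int) : List (List Int) :=
  let n := arr.length
  -- 2 ** math.ceil(math.log2(n)); for 1 ≤ n ≤ 2^31 the float log2/ceil equal Nat.clog 2 n exactly
  let power_of_two := 2 ^ Nat.clog 2 n
  let padded := arr ++ List.replicate (power_of_two - n) 0
  buildUp padded [padded]

-- ===== PORT B =====
-- _build: base case len == 1 returns [[sub[0]]] = [sub]; the ≤ makes the Lean function total
-- (length 0 is unreachable from a padded nonempty array; Python recurses forever there)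
def buildRec (sub : List Int) : List (List Int) :=
  if sub.length ≤ 1 then [sub]
  else
    let mid := sub.length / 2
    let left := buildRec (List.take mid sub)
    let right := buildRec (List.drop mid sub)
    [[left.headI.headI + right.headI.headI]] ++ List.zipWith (· ++ ·) left right
termination_by sub.length
decreasing_by all_goals simp; omega

def build_accumulation_tree_alt (arr : List Int) : List (List Int) :=
  let n := arr.length
  let power_of_two := 2 ^ Nat.clog 2 n
  let padded := arr ++ List.replicate (power_of_two - n) 0
  buildRec padded

-- ===== PRECONDITION & SPEC =====
-- Python A raises ValueError (math.log2(0)) on the empty list; B raises there too.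
def Pre_build_accumulation_tree (arr : List Int) : Prop := arr ≠ []
instance (arr : List Int) : Decidable (Pre_build_accumulation_tree arr) := by unfold Pre_build_accumulation_tree; infer_instance
def pvWitness_build_accumulation_tree : List Int := [1, 2, 3]

def Spec_build_accumulation_tree (arr : List Int) (out : List (List Int)) : Prop := out = build_accumulation_tree_alt arr
instance (arr : List Int) (out : List (List Int)) : Decidable (Spec_build_accumulation_tree arr out) := by unfold Spec_build_accumulation_tree; infer_instance

-- ===== CLAIM (what is proved, stated in full; the proofs are below) =====
def Claim_equal_build_accumulation_tree : Prop := ∀ (arr : List Int), Dom_build_accumulation_tree arr → Pre_build_accumulation_tree arr → Spec_build_accumulation_tree arr (build_accumulation_tree arr)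

-- ===== LEMMAS AND PROOFS =====

theorem pairSum_sum : ∀ l : List Int, l.length % 2 = 0 → (pairSum l).sum = l.sum
  | [], _ => by simp [pairSum]
  | [_], h => by simp at h
  | a :: b :: t, h => by
      have := pairSum_sum t (by simp at h; omega)
      simp [pairSum, this]; ring

theorem pairSum_append : ∀ l r : List Int, l.length % 2 = 0 →
    pairSum (l ++ r) = pairSum l ++ pairSum r
  | [], r, _ => by simp [pairSum]
  | [_], _, h => by simp at h
  | a :: b :: t, r, h => by
      have := pairSum_append t r (by simp at h; omega)
      simp [pairSum, this]

-- the list of levels (root first) built bottom-up from a leaf level l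
def levelsF (l : List Int) : List (List Int) :=
  if l.length ≤ 1 then [l] else levelsF (pairSum l) ++ [l]
termination_by l.length
decreasing_by simp [pairSum_length]; omega

theorem buildUp_eq_levelsF : ∀ (n : Nat) (l : List Int) (acc : List (List Int)),
    l.length ≤ n → buildUp l (l :: acc) = levelsF l ++ acc := by
  intro n
  induction n with
  | zero =>
      intro l acc h
      have hl : l.length = 0 := Nat.le_zero.mp h
      rw [buildUp, levelsF]
      simp [hl]
  | succ n ih =>
      intro l acc h
      by_cases h1 : l.length ≤ 1
      · rw [buildUp, levelsF]; simp [h1]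
      · rw [buildUp, levelsF]
        simp only [if_pos (by omega : l.length > 1), if_neg h1]
        have : (pairSum l).length ≤ n := by rw [pairSum_length]; omega
        rw [ih (pairSum l) (l :: acc) this]
        simp

-- the master invariant, by induction on the height k
theorem master : ∀ (k : Nat) (l r : List Int), l.length = 2 ^ k → r.length = 2 ^ k →
    (levelsF l).length = k + 1 ∧ (levelsF l).headI = [l.sum] ∧ buildRec l = levelsF l ∧
    levelsF (l ++ r) = [[l.sum + r.sum]] ++ List.zipWith (· ++ ·) (levelsF l) (levelsF r) := by
  intro k
  induction k with
  | zero =>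
      intro l r hl hr
      obtain ⟨a, rfl⟩ := List.length_eq_one_iff.mp hl
      obtain ⟨b, rfl⟩ := List.length_eq_one_iff.mp hr
      refine ⟨?_, ?_, ?_, ?_⟩ <;>
        rw [levelsF] <;>
        simp [buildRec, levelsF, pairSum]
  | succ k ih =>
      intro l r hl hr
      have h2 : (2:ℕ) ^ (k+1) = 2 ^ k + 2 ^ k := by ring
      have hpos : (1:ℕ) ≤ 2 ^ k := Nat.one_le_two_pow
      have hlen1 : ¬ l.length ≤ 1 := by rw [hl, h2]; omega
      have hleven : l.length % 2 = 0 := by rw [hl]; simp [pow_succ, Nat.mul_mod_left]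
      have hreven : r.length % 2 = 0 := by rw [hr]; simp [pow_succ, Nat.mul_mod_left]
      -- the two halves of l
      set mid := l.length / 2 with hmid
      have hmid2 : mid = 2 ^ k := by rw [hmid, hl, h2]; omega
      have htk : (List.take mid l).length = 2 ^ k := by
        simp [List.length_take, hl, hmid2, h2]
      have hdp : (List.drop mid l).length = 2 ^ k := by
        simp [List.length_drop, hl, hmid2, h2]
      obtain ⟨ihLen, ihHead, ihRec, ihApp⟩ := ih (List.take mid l) (List.drop mid l) htk hdp
      obtain ⟨ihLenD, ihHeadD, ihRecD, _⟩ := ih (List.drop mid l) (List.take mid l) hdp htk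
      -- pairSum facts for l and r
      have hpsl : (pairSum l).length = 2 ^ k := by rw [pairSum_length, hl, h2]; omega
      have hpsr : (pairSum r).length = 2 ^ k := by rw [pairSum_length, hr, h2]; omega
      obtain ⟨psLen, psHead, _, psApp⟩ := ih (pairSum l) (pairSum r) hpsl hpsr
      obtain ⟨psLenR, psHeadR, _, _⟩ := ih (pairSum r) (pairSum l) hpsr hpsl
      have hFl : levelsF l = levelsF (pairSum l) ++ [l] := by
        rw [levelsF]; simp [hlen1]
      have hFlSplit : levelsF l = [[l.sum]] ++ List.zipWith (· ++ ·)
          (levelsF (List.take mid l)) (levelsF (List.drop mid l)) := by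
        have := ihApp
        rw [List.take_append_drop] at this
        have hsum : (List.take mid l).sum + (List.drop mid l).sum = l.sum := by
          conv_rhs => rw [← List.take_append_drop mid l]
          simp
        rw [this, hsum]
      refine ⟨?_, ?_, ?_, ?_⟩
      · -- length
        rw [hFl]; simp [psLen]
      · -- head
        rw [hFlSplit]; simp
      · -- buildRec l = levelsF l
        rw [buildRec]
        simp only [if_neg hlen1]
        rw [← hmid, ihRec, ihRecD, hFlSplit, ihHead, ihHeadD]
        simp
      · -- levelsF (l ++ r)
        have hr1 : ¬ (l ++ r).length ≤ 1 := by simp [hl, hr, h2]; omega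
        rw [levelsF]
        simp only [if_neg hr1]
        rw [pairSum_append l r hleven, psApp,
            pairSum_sum l hleven, pairSum_sum r hreven]
        have hFr : levelsF r = levelsF (pairSum r) ++ [r] := by
          rw [levelsF]; simp [show ¬ r.length ≤ 1 by rw [hr, h2]; omega]
        rw [hFl, hFr]
        rw [List.zipWith_append (h := by rw [psLen, psLenR])]
        simp

-- ===== VERDICT (by name: the statement is the Claim_ definition above) =====
theorem build_accumulation_tree_spec : Claim_equal_build_accumulation_tree := by
  intro arr _ hne
  unfold Spec_build_accumulation_tree build_accumulation_tree build_accumulation_tree_alt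
  have hn : 1 ≤ arr.length := List.length_pos_iff.mpr hne
  have hle : arr.length ≤ 2 ^ Nat.clog 2 arr.length :=
    Nat.le_pow_clog (by norm_num) _
  have hpadlen : (arr ++ List.replicate (2 ^ Nat.clog 2 arr.length - arr.length) (0 : Int)).length
      = 2 ^ Nat.clog 2 arr.length := by simp; omega
  rw [buildUp_eq_levelsF (arr ++ List.replicate (2 ^ Nat.clog 2 arr.length - arr.length) 0).length
      _ [] (le_refl _)]
  rw [(master (Nat.clog 2 arr.length) _ _ hpadlen hpadlen).2.2.1]
  simp
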